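-- pv_equiv track=rewrite | github.com/iam52/coding_everyday | 프로그래머스/unrated/181932. 코드 처리하기/코드 처리하기.py | solution
-- ===== SOURCE A (Python) =====
-- def solution(code):
--     answer = ''
--     mode = 0
--     for idx, char in enumerate(code):
--         if char == "1":
--             mode = 1 - mode
--         else:
--             if (mode == 0 and idx % 2 == 0) or (mode == 1 and idx % 2 == 1):
--                 answer += char
--     return answer if answer else "EMPTY"
-- ===== SOURCE B (Python) =====
-- def solution(code):
--     out = []
--     pos = 0
--     for mode, seg in enumerate(code.split('1')):
--         out.append(seg[(mode - pos) % 2 :: 2])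
--         pos += len(seg) + 1
--     res = ''.join(out)
--     return res if res else 'EMPTY'
-- ===== Notes on version B (the rewrite author's own statement) =====
-- stated objective: faster
-- what changed: Instead of scanning character by character while toggling a mode flag, B splits the code on the toggle character (segments between toggles alternate mode with their index) and concatenates a stride-2 slice seg[(mode - pos) % 2 :: 2] of each segment, doing the per-character work in C-level str.split/slicing instead of a Python-level loop.
import Mathlib
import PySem

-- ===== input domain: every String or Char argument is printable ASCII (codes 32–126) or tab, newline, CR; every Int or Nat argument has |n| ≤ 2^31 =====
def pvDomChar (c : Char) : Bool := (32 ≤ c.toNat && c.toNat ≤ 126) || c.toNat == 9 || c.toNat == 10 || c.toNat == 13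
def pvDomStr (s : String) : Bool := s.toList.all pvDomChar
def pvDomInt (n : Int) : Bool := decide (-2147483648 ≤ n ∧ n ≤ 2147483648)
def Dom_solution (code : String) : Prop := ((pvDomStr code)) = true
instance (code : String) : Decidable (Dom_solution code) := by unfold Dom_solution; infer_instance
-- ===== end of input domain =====

-- B replaces A's per-character mode-toggling loop by splitting the code on '1' (segments alternate
-- mode with their index) and taking a stride-2 slice of each segment (objective: faster, measured).


-- ===== PORT A =====
-- literal transliteration of A: fold over enumerate(code) carrying (answer, mode)
def solution (code : String) : String :=
  let st := (PySem.List.enumerate code.toList 0).foldl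
    (fun (st : String × Int) (p : Int × Char) =>
      if p.2 == '1' then (st.1, 1 - st.2)
      else if (st.2 == 0 && PySem.Int.mod p.1 2 == 0) || (st.2 == 1 && PySem.Int.mod p.1 2 == 1)
        then (st.1 ++ String.singleton p.2, st.2)
      else st) ("", 0)
  if st.1 == "" then "EMPTY" else st.1

-- ===== PORT B =====
-- literal transliteration of B: split the code on '1' ("1" ≠ "" so split? is some and getD's
-- default is never consulted), then for each (mode, seg) append the stride-2 slice
-- seg[(mode - pos) % 2 :: 2] (step 2 ≠ 0 so slice? is some), joining with ''.join at the end.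
def solution_alt (code : String) : String :=
  let st := (PySem.List.enumerate ((PySem.Str.split? code "1").getD []) 0).foldl
    (fun (st : List String × Int) (p : Int × String) =>
      (st.1 ++ [(PySem.Str.slice? p.2 (some (PySem.Int.mod (p.1 - st.2) 2)) none 2).getD ""],
       st.2 + PySem.Str.len p.2 + 1)) ([], 0)
  let res := PySem.Str.join "" st.1
  if res == "" then "EMPTY" else res

-- ===== PRECONDITION & SPEC =====
def Spec_solution (code : String) (out : String) : Prop := out = solution_alt code
instance (code : String) (out : String) : Decidable (Spec_solution code out) := by unfold Spec_solution; infer_instance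

-- ===== CLAIM (what is proved, stated in full; the proofs are below) =====
def Claim_equal_solution : Prop := ∀ (code : String), Dom_solution code → Spec_solution code (solution code)

-- ===== LEMMAS AND PROOFS =====

-- The common specification: the chars kept when scanning l starting at absolute index k
-- with current mode-parity b (b = true ↔ mode = 1).
def keepSpec : List Char → Nat → Bool → List Char
  | [], _, _ => []
  | c :: t, k, b =>
    if c = '1' then keepSpec t (k + 1) (!b)
    else if b = decide (k % 2 = 1) then c :: keepSpec t (k + 1) b
    else keepSpec t (k + 1) b

theorem dvd_two_cast_iff (k : Nat) : ((2 : Int) ∣ (k : Int)) ↔ (k % 2 = 0) := by omega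

theorem mod_two_cast_iff (k : Nat) : ((k : Int) % 2 = 1) ↔ (k % 2 = 1) := by omega

theorem loopA (l : List Char) (k : Nat) (acc : String) (m : Int) (hm : m = 0 ∨ m = 1) :
    ((PySem.List.enumerate l (k : Int)).foldl
      (fun (st : String × Int) (p : Int × Char) =>
        if p.2 == '1' then (st.1, 1 - st.2)
        else if (st.2 == 0 && PySem.Int.mod p.1 2 == 0) || (st.2 == 1 && PySem.Int.mod p.1 2 == 1)
          then (st.1 ++ String.singleton p.2, st.2)
        else st) (acc, m)).1.toList
    = acc.toList ++ keepSpec l k (decide (m = 1)) := by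
  induction l generalizing k acc m hm with
  | nil => simp [PySem.List.enumerate_nil, keepSpec]
  | cons c t ih =>
    rw [PySem.List.enumerate_cons, List.foldl_cons]
    have ihk : ∀ (a : String) (m' : Int), m' = 0 ∨ m' = 1 →
        ((PySem.List.enumerate t ((k : Int) + 1)).foldl
          (fun (st : String × Int) (p : Int × Char) =>
            if p.2 == '1' then (st.1, 1 - st.2)
            else if (st.2 == 0 && PySem.Int.mod p.1 2 == 0) || (st.2 == 1 && PySem.Int.mod p.1 2 == 1)
              then (st.1 ++ String.singleton p.2, st.2)
            else st) (a, m')).1.toList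
        = a.toList ++ keepSpec t (k + 1) (decide (m' = 1)) := by
      intro a m' hm'
      have := ih (k + 1) a m' hm'
      simpa [Nat.cast_add] using this
    rcases hm with rfl | rfl <;> rcases Nat.mod_two_eq_zero_or_one k with hq | hq <;>
      by_cases hc : c = '1' <;>
      simp [hc, hq, dvd_two_cast_iff, mod_two_cast_iff, keepSpec] <;>
      first
        | simpa using ihk acc 0 (Or.inl rfl)
        | simpa using ihk acc 1 (Or.inr rfl)
        | simpa using ihk (acc ++ String.singleton c) 0 (Or.inl rfl)
        | simpa using ihk (acc ++ String.singleton c) 1 (Or.inr rfl)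

-- Specification of splitting on '1'.
def segs : List Char → List (List Char)
  | [] => [[]]
  | c :: t => if c = '1' then [] :: segs t else (c :: (segs t).headI) :: (segs t).tail

theorem segs_ne_nil (l : List Char) : segs l ≠ [] := by
  cases l with
  | nil => simp [segs]
  | cons c t => by_cases hc : c = '1' <;> simp [segs, hc]

theorem segs_head_tail (l : List Char) : segs l = (segs l).headI :: (segs l).tail := by
  rcases h : segs l with _ | ⟨s, ss⟩
  · exact absurd h (segs_ne_nil l)
  · simp

theorem go_eq (l : List Char) (fuel : Nat) (cur : List Char) (acc : List (List Char))
    (h : l.length < fuel) :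
    PySem.Chars.splitOn.go ['1'] fuel l cur acc
      = acc.reverse ++ ((cur.reverse ++ (segs l).headI) :: (segs l).tail) := by
  induction l generalizing fuel cur acc with
  | nil =>
    cases fuel with
    | zero => omega
    | succ f =>
      rw [PySem.Chars.splitOn.go]
      · simp [segs]
      · omega
  | cons c t ih =>
    cases fuel with
    | zero => simp at h
    | succ f =>
      rw [PySem.Chars.splitOn.go]
      by_cases hc : c = '1'
      · simp only [hc, List.isPrefixOf, BEq.rfl, Bool.true_and,
          if_true, List.length_singleton, List.drop_succ_cons, List.drop_zero]
        rw [ih f [] (cur.reverse :: acc) (by simpa using Nat.lt_of_succ_lt_succ h)]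
        have hsegs : segs ('1' :: t) = [] :: segs t := by rw [segs]; simp
        rw [hsegs]
        simp only [List.headI_cons, List.tail_cons]
        conv_rhs => rw [segs_head_tail t]
        simp
      · have hpre : ['1'].isPrefixOf (c :: t) = false := by
          simp only [List.isPrefixOf, Bool.and_eq_false_iff]
          left
          simpa [beq_iff_eq] using fun hcontra => hc hcontra.symm
        rw [hpre]
        simp only [Bool.false_eq_true, if_false]
        rw [ih f (c :: cur) acc (by simpa using Nat.lt_of_succ_lt_succ h)]
        have hsegs : segs (c :: t) = (c :: (segs t).headI) :: (segs t).tail := by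
          rw [segs]; simp [hc]
        rw [hsegs]
        simp

theorem splitOn_eq_segs (l : List Char) : PySem.Chars.splitOn l ['1'] = segs l := by
  rw [PySem.Chars.splitOn, go_eq l (l.length + 1) [] [] (by omega)]
  simpa using (segs_head_tail l).symm

-- Every other element (indices 0, 2, 4, …).
def alt {α : Type} : List α → List α
  | [] => []
  | [a] => [a]
  | a :: _ :: t => a :: alt t

theorem alt_cons {α : Type} (a : α) (t : List α) : alt (a :: t) = a :: alt (t.drop 1) := by
  cases t <;> simp [alt]

theorem filt {α : Type} (d : Nat) (xs : List α) (s : Nat) (hd : xs.length - s ≤ d) :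
    List.filterMap (fun k => xs[s + 2 * k]?) (List.range ((xs.length - s + 1) / 2))
      = alt (xs.drop s) := by
  induction d generalizing s with
  | zero =>
    have h0 : xs.length - s = 0 := by omega
    rw [h0]
    simp [List.drop_eq_nil_of_le (by omega : xs.length ≤ s), alt]
  | succ d ih =>
    by_cases h : xs.length ≤ s
    · have h0 : xs.length - s = 0 := by omega
      rw [h0]
      simp [List.drop_eq_nil_of_le h, alt]
    · have hs : s < xs.length := by omega
      have hc : (xs.length - s + 1) / 2 = (xs.length - (s + 2) + 1) / 2 + 1 := by omega
      rw [hc, List.range_succ_eq_map, List.filterMap_cons]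
      simp only [Nat.mul_zero, Nat.add_zero, List.getElem?_eq_getElem hs,
        List.filterMap_map]
      have hfun : ((fun k => xs[s + 2 * k]?) ∘ Nat.succ) = fun k => xs[(s + 2) + 2 * k]? := by
        funext k
        simp only [Function.comp]
        congr 1
        omega
      rw [hfun, ih (s + 2) (by omega)]
      rw [List.drop_eq_getElem_cons hs, alt_cons]
      simp [List.drop_drop]

theorem slice?_two {α : Type} (xs : List α) (s : Nat) :
    PySem.List.slice? xs (some (s : Int)) none 2 = some (alt (xs.drop s)) := by
  rw [PySem.List.slice?]
  simp only [PySem.List.sliceIndices]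
  norm_num
  have hm : ¬ ((s : Int) < 0) := by omega
  have hmin : min (s : Int) (xs.length : Int) = ((min s xs.length : Nat) : Int) := by omega
  rw [if_neg hm, hmin]
  have hdrop : xs.drop s = xs.drop (min s xs.length) := by
    rcases Nat.le_total s xs.length with h | h
    · rw [Nat.min_eq_left h]
    · rw [Nat.min_eq_right h, List.drop_eq_nil_of_le h, List.drop_length]
  rw [hdrop]
  by_cases hlt : min s xs.length < xs.length
  · rw [if_pos (by exact_mod_cast hlt)]
    have hcnt : ((((xs.length : Int)) - ((min s xs.length : Nat) : Int) + 2 - 1) / 2).toNat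
        = (xs.length - min s xs.length + 1) / 2 := by omega
    rw [hcnt]
    have hfun : (fun k : Nat => xs[(((min s xs.length : Nat) : Int) + 2 * (k : Int)).toNat]?)
        = fun k : Nat => xs[min s xs.length + 2 * k]? := by
      funext k
      congr 1
    rw [hfun, filt (xs.length) xs (min s xs.length) (by omega)]
  · have heq : min s xs.length = xs.length := by omega
    rw [if_neg (by exact_mod_cast hlt)]
    rw [heq]
    simp [alt]

-- The B-side specification: for the list of segments starting with mode-parity b at
-- absolute position k, the slices that B keeps.
def J : List (List Char) → Bool → Nat → List (List Char)
  | [], _, _ => []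
  | s :: t, b, k =>
    alt (s.drop (if b = decide (k % 2 = 1) then 0 else 1)) :: J t (!b) (k + s.length + 1)

theorem parity_succ (k : Nat) : decide ((k + 1) % 2 = 1) = !decide (k % 2 = 1) := by
  rcases Nat.mod_two_eq_zero_or_one k with h | h <;> simp [h, Nat.add_mod]

theorem keep_segs (l : List Char) (k : Nat) (b : Bool) :
    keepSpec l k b = (J (segs l) b k).flatten := by
  induction l generalizing k b with
  | nil => simp [keepSpec, segs, J, alt]
  | cons c t ih =>
    by_cases hc : c = '1'
    · have hsegs : segs (c :: t) = [] :: segs t := by rw [segs]; simp [hc]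
      rw [hsegs]
      simp only [keepSpec, if_pos hc, J, List.drop_nil, List.flatten_cons, List.length_nil]
      rw [ih (k + 1) (!b)]
      simp [alt]
    · have hsegs : segs (c :: t) = (c :: (segs t).headI) :: (segs t).tail := by
        rw [segs]; simp [hc]
      rw [hsegs]
      have iht := ih (k + 1) b
      conv_rhs at iht => rw [segs_head_tail t]
      by_cases hb : b = decide (k % 2 = 1)
      · simp only [keepSpec, if_neg hc, if_pos hb]
        rw [iht]
        simp only [J, List.flatten_cons]
        rw [if_pos hb, if_neg (by rw [parity_succ]; simp [hb])]
        rw [List.drop_zero, alt_cons]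
        simp only [List.length_cons, List.cons_append]
        rw [show k + 1 + (segs t).headI.length + 1 = k + ((segs t).headI.length + 1) + 1 by omega]
      · simp only [keepSpec, if_neg hc, if_neg hb]
        rw [iht]
        simp only [J, List.flatten_cons]
        rw [if_neg hb, if_pos (by rw [parity_succ]; cases b <;> simp_all)]
        simp only [List.drop_succ_cons, List.drop_zero, List.length_cons]
        rw [show k + 1 + (segs t).headI.length + 1 = k + ((segs t).headI.length + 1) + 1 by omega]

theorem mod_sub_two (m k : Nat) :
    PySem.Int.mod ((m : Int) - (k : Int)) 2
      = if decide (m % 2 = 1) = decide (k % 2 = 1) then 0 else 1 := by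
  rw [PySem.Int.mod_eq_emod_of_pos (show (0:Int) < 2 by omega)]
  rcases Nat.mod_two_eq_zero_or_one m with h1 | h1 <;>
    rcases Nat.mod_two_eq_zero_or_one k with h2 | h2 <;> simp [h1, h2] <;> omega

theorem loopB (ss : List (List Char)) (m k : Nat) (acc : List String) :
    List.map String.toList
      (((PySem.List.enumerate (ss.map String.ofList) (m : Int)).foldl
        (fun (st : List String × Int) (p : Int × String) =>
          (st.1 ++ [(PySem.Str.slice? p.2 (some (PySem.Int.mod (p.1 - st.2) 2)) none 2).getD ""],
           st.2 + PySem.Str.len p.2 + 1)) (acc, (k : Int))).1)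
    = List.map String.toList acc ++ J ss (decide (m % 2 = 1)) k := by
  induction ss generalizing m k acc with
  | nil => simp [PySem.List.enumerate_nil, J]
  | cons s t ih =>
    rw [List.map_cons, PySem.List.enumerate_cons, List.foldl_cons]
    have hslice : (PySem.Str.slice? (String.ofList s)
          (some (PySem.Int.mod ((m : Int) - (k : Int)) 2)) none 2).getD ""
        = String.ofList (alt (s.drop (if decide (m % 2 = 1) = decide (k % 2 = 1) then 0 else 1))) := by
      rw [mod_sub_two]
      by_cases hb : decide (m % 2 = 1) = decide (k % 2 = 1) <;>
        simp only [hb, ite_true, ite_false] <;>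
        rw [PySem.Str.slice?] <;>
        simp only [String.toList_ofList, PySem.Chars.slice?_eq_listSlice?] <;>
        [rw [show (0:Int) = ((0:Nat):Int) by norm_num, slice?_two s 0];
         rw [show (1:Int) = ((1:Nat):Int) by norm_num, slice?_two s 1]] <;>
        simp
    have hlen : (k : Int) + PySem.Str.len (String.ofList s) + 1 = ((k + s.length + 1 : Nat) : Int) := by
      rw [PySem.Str.len_eq, String.toList_ofList]
      push_cast
      ring
    rw [hslice, hlen]
    have hm1 : ((m : Int) + 1) = ((m + 1 : Nat) : Int) := by push_cast; ring
    rw [hm1, ih (m + 1) (k + s.length + 1)]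
    simp only [List.map_append, List.map_cons, List.map_nil, String.toList_ofList,
      List.append_assoc, List.cons_append, List.nil_append]
    rw [J, parity_succ]

theorem intercalate_nil_flatten (l : List (List Char)) : List.intercalate [] l = l.flatten := by
  induction l with
  | nil => rfl
  | cons a t ih =>
    cases t with
    | nil => rfl
    | cons b u =>
      simp only [List.intercalate, List.intersperse] at ih ⊢
      simp only [List.flatten_cons] at *
      rw [← ih]
      simp

-- ===== VERDICT (by name: the statement is the Claim_ definition above) =====
theorem solution_spec : Claim_equal_solution := by
  intro code _
  unfold Spec_solution
  simp only [solution, solution_alt]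
  have hsplit : (PySem.Str.split? code "1").getD []
      = (segs code.toList).map String.ofList := by
    rw [PySem.Str.split?, PySem.Chars.split?]
    rw [show ("1" : String).toList = ['1'] by decide]
    simp [splitOn_eq_segs]
  have hA := loopA code.toList 0 "" 0 (Or.inl rfl)
  simp only [Nat.cast_zero, String.toList_empty, List.nil_append,
    show (decide ((0 : Int) = 1)) = false from by decide] at hA
  have hB := loopB (segs code.toList) 0 0 []
  simp only [Nat.cast_zero, List.map_nil, List.nil_append,
    show (decide ((0 : Nat) % 2 = 1)) = false from by decide] at hB
  rw [hsplit]
  have hjoin : (PySem.Str.join ""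
      (((PySem.List.enumerate ((segs code.toList).map String.ofList) 0).foldl
        (fun (st : List String × Int) (p : Int × String) =>
          (st.1 ++ [(PySem.Str.slice? p.2 (some (PySem.Int.mod (p.1 - st.2) 2)) none 2).getD ""],
           st.2 + PySem.Str.len p.2 + 1)) ([], 0)).1)).toList
      = keepSpec code.toList 0 false := by
    rw [PySem.Str.join, String.toList_ofList]
    rw [show ("" : String).toList = [] by decide]
    rw [PySem.Chars.join, hB, intercalate_nil_flatten, ← keep_segs]
  have hstr : ((PySem.List.enumerate code.toList 0).foldl
      (fun (st : String × Int) (p : Int × Char) =>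
        if p.2 == '1' then (st.1, 1 - st.2)
        else if (st.2 == 0 && PySem.Int.mod p.1 2 == 0) || (st.2 == 1 && PySem.Int.mod p.1 2 == 1)
          then (st.1 ++ String.singleton p.2, st.2)
        else st) ("", 0)).1
      = PySem.Str.join ""
        (((PySem.List.enumerate ((segs code.toList).map String.ofList) 0).foldl
          (fun (st : List String × Int) (p : Int × String) =>
            (st.1 ++ [(PySem.Str.slice? p.2 (some (PySem.Int.mod (p.1 - st.2) 2)) none 2).getD ""],
             st.2 + PySem.Str.len p.2 + 1)) ([], 0)).1) := by
    rw [← String.ofList_toList (s := ((PySem.List.enumerate code.toList 0).foldl _ ("", 0)).1),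
      ← String.ofList_toList (s := PySem.Str.join "" _)]
    rw [hjoin, hA]
  rw [hstr]
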